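-- pv_equiv track=rewrite | github.com/adityajadhav-quant/python-practice | day1.py | solution
-- ===== SOURCE A (Python) =====
-- def solution(A):
--   freq = {}
--   # count the frequency of each number
--   for x in A:
--     if x in freq:
--       freq[x] += 1
--     else:
--       freq[x] = 1
--   # find the largest number whose freq equals to number
--   answer = 0
--   for x in freq:
--     if freq[x] == x:
--       answer = max(answer, x)
--   return answer
-- ===== SOURCE B (Python) =====
-- def solution(A):
--     answer = 0
--     prev = None
--     run = 0
--     for x in sorted(A):
--         if x == prev:
--             run += 1
--         else:
--             if run == prev:
--                 answer = max(answer, prev)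
--             prev = x
--             run = 1
--     if run == prev:
--         answer = max(answer, prev)
--     return answer
-- ===== Notes on version B (the rewrite author's own statement) =====
-- stated objective: alternative
-- what changed: Replaces the dict frequency counter plus key scan by sorting the list and making one linear sweep that tracks the current run of equal values, flushing a candidate whenever the run length equals the value.
import Mathlib
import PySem

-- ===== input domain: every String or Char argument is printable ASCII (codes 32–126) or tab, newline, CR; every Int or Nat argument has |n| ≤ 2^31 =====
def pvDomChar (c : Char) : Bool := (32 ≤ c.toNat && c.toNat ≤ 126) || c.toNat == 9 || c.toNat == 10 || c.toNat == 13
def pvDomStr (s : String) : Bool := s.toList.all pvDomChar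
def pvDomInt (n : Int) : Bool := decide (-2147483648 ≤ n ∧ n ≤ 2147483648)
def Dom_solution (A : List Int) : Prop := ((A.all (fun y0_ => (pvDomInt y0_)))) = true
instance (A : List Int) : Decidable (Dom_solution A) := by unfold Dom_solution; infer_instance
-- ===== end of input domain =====

-- B replaces A's dict-counting pass + key scan by sorting the list and making one
-- linear sweep over runs of equal values (alternative decomposition, not claimed faster).

-- ===== PORT A =====
def solution (A : List Int) : Int :=
  -- freq = {}; for x in A: if x in freq: freq[x] += 1 else: freq[x] = 1
  let freq := A.foldl
    (fun d x => if d.contains x then d.insert x (d.getD x 0 + 1) else d.insert x 1)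
    PySem.Dict.empty
  -- answer = 0; for x in freq: if freq[x] == x: answer = max(answer, x)
  -- (freq[x] never raises here since x ranges over freq's keys, so getD is exact)
  freq.keys.foldl (fun answer x => if freq.getD x 0 == x then max answer x else answer) 0

-- ===== PORT B =====
-- 'if run == prev: answer = max(answer, prev)' (prev is None or the previous value;
-- '0 == None' is False in Python, matched by the 'none' branch)
def pvFlush (ans : Int) (prev : Option Int) (run : Int) : Int :=
  match prev with
  | none => ans
  | some p => if run == p then max ans p else ans

-- the body of 'for x in sorted(A)' over the state (answer, prev, run)
def pvStepB (s : Int × Option Int × Int) (x : Int) : Int × Option Int × Int :=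
  if some x == s.2.1 then (s.1, s.2.1, s.2.2 + 1)
  else (pvFlush s.1 s.2.1 s.2.2, some x, 1)

def solution_alt (A : List Int) : Int :=
  let s := (PySem.List.sorted A (fun x => x) false).foldl pvStepB (0, none, 0)
  pvFlush s.1 s.2.1 s.2.2

-- ===== PRECONDITION & SPEC =====
def Spec_solution (A : List Int) (out : Int) : Prop := out = solution_alt A
instance (A : List Int) (out : Int) : Decidable (Spec_solution A out) := by unfold Spec_solution; infer_instance

-- ===== CLAIM (what is proved, stated in full; the proofs are below) =====
def Claim_equal_solution : Prop := ∀ (A : List Int), Dom_solution A → Spec_solution A (solution A)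

-- ===== LEMMAS AND PROOFS =====

-- the value both programs fold over the distinct elements of C:
-- 'if the frequency in C equals the value, take the max'
def pvStep (C : List Int) (ans x : Int) : Int :=
  if (List.count x C : Int) == x then max ans x else ans

theorem pvStep_rightComm (C : List Int) : RightCommutative (pvStep C) := by
  constructor
  intro a x y
  unfold pvStep
  split_ifs <;> omega

theorem pvStep_congr {C D : List Int} (ans x : Int) (h : List.count x C = List.count x D) :
    pvStep C ans x = pvStep D ans x := by
  unfold pvStep; rw [h]

-- A's result is the pvStep-fold over the distinct values of A
theorem solution_eq_fold (A : List Int) :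
    solution A = (PySem.Set.ofList A).foldl (pvStep A) 0 := by
  have hfreq : A.foldl
      (fun d x => if d.contains x then d.insert x (d.getD x 0 + 1) else d.insert x 1)
      PySem.Dict.empty = PySem.Dict.counter A := by
    refine (PySem.List.foldl_congr_mem A _
        (fun d x => d.insert x (d.getD x 0 + 1)) PySem.Dict.empty ?_).trans
      (PySem.Dict.foldl_insert_getD_add_one_eq_counter A)
    intro d x _
    by_cases h : d.contains x
    · simp [h]
    · have h' : d.contains x = false := by simpa using h
      simp [h', PySem.Dict.getD_of_not_contains d 0 h']
  unfold solution
  simp only [hfreq, PySem.Dict.keys_counter]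
  refine PySem.List.foldl_congr_mem _ _ _ _ ?_
  intro acc x _
  simp [PySem.Dict.getD_counter, pvStep]

-- first-occurrence dedup of a list headed by a fresh element
theorem foldl_add_cons (v : Int) :
    ∀ (l : List Int) (s : List Int), v ∉ l →
      l.foldl PySem.Set.add (v :: s) = v :: l.foldl PySem.Set.add s := by
  intro l
  induction l with
  | nil => intro s _; rfl
  | cons x l' ih =>
    intro s hv
    have hxv : x ≠ v := fun h => hv (by simp [h])
    have hne : (x == v) = false := by simpa using hxv
    simp only [List.foldl_cons]
    have hadd : PySem.Set.add (v :: s) x =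
        v :: PySem.Set.add s x := by
      simp only [PySem.Set.add, PySem.Set.contains, List.contains_cons, hne, Bool.false_or, List.cons_append]
      split <;> rfl
    rw [hadd]
    exact ih _ (fun h => hv (by simp [h]))

theorem ofList_cons_not_mem {v : Int} {l : List Int} (hv : v ∉ l) :
    PySem.Set.ofList (v :: l) = v :: PySem.Set.ofList l := by
  rw [PySem.Set.ofList_eq_foldl, PySem.Set.ofList_eq_foldl]
  simpa [PySem.Set.add] using foldl_add_cons v l [] hv

theorem ofList_cons_cons_self (v : Int) (l : List Int) :
    PySem.Set.ofList (v :: v :: l) = PySem.Set.ofList (v :: l) := by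
  rw [PySem.Set.ofList_eq_foldl, PySem.Set.ofList_eq_foldl]
  simp [PySem.Set.add]

-- the sweep, started inside a run of r copies of v with everything ahead ≥ v,
-- computes the pvStep-fold over the distinct remaining values
theorem sweep_from :
    ∀ (l : List Int), l.Pairwise (· ≤ ·) → ∀ (ans v : Int) (r : Nat), 0 < r →
      (∀ y ∈ l, v ≤ y) →
      (let s := l.foldl pvStepB (ans, some v, (r : Int));
        pvFlush s.1 s.2.1 s.2.2) =
      (PySem.Set.ofList (v :: l)).foldl (pvStep (List.replicate r v ++ l)) ans := by
  intro l
  induction l with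
  | nil =>
    intro _ ans v r hr _
    simp [pvFlush, pvStep, PySem.Set.ofList, PySem.Set.add, List.count_replicate_self]
  | cons x l' ih =>
    intro hp ans v r hr hv
    have hp' := List.pairwise_cons.mp hp
    have hvx : v ≤ x := hv x (by simp)
    by_cases hxv : x = v
    · subst hxv
      have hstep : pvStepB (ans, some x, (r : Int)) x = (ans, some x, (r : Int) + 1) := by
        simp [pvStepB]
      have hcast : ((r : Int) + 1) = ((r + 1 : Nat) : Int) := by push_cast; ring
      rw [List.foldl_cons, hstep, hcast,
        ih hp'.2 ans x (r + 1) (by omega) hp'.1,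
        ofList_cons_cons_self]
      refine PySem.List.foldl_congr_mem _ _ _ _ ?_
      intro acc y _
      refine pvStep_congr acc y ?_
      have hperm : (List.replicate r x ++ x :: l').Perm (List.replicate (r + 1) x ++ l') := by
        have heq : List.replicate (r + 1) x ++ l' = x :: (List.replicate r x ++ l') := by
          simp [List.replicate_succ]
        rw [heq]
        exact List.perm_middle
      exact (hperm.count_eq y).symm
    · have hlt : v < x := lt_of_le_of_ne hvx (Ne.symm hxv)
      have hne : (some x == some v) = false := by simpa using hxv
      have hstep : pvStepB (ans, some v, (r : Int)) x =
          (pvFlush ans (some v) (r : Int), some x, 1) := by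
        simp [pvStepB, hne]
      have h1 : ((1 : Int)) = ((1 : Nat) : Int) := by norm_num
      rw [List.foldl_cons, hstep, h1,
        ih hp'.2 _ x 1 (by omega) hp'.1]
      -- v is strictly below everything in x :: l'
      have hvnot : v ∉ x :: l' := by
        intro hmem
        rcases List.mem_cons.mp hmem with h | h
        · exact hxv h.symm
        · exact absurd (hp'.1 v h) (by omega)
      rw [ofList_cons_not_mem hvnot, List.foldl_cons]
      have hcv : List.count v (x :: l') = 0 := List.count_eq_zero.mpr hvnot
      have hfirst : pvStep (List.replicate r v ++ x :: l') ans v =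
          pvFlush ans (some v) (r : Int) := by
        unfold pvStep pvFlush
        rw [List.count_append, List.count_replicate_self, hcv]
        simp
      rw [hfirst]
      refine (PySem.List.foldl_congr_mem _ _ _ _ ?_).symm
      intro acc y hy
      refine pvStep_congr acc y ?_
      have hyx : y ∈ x :: l' := by
        have := (PySem.Set.mem_ofList _ y).mp hy
        simpa using this
      have hyv : y ≠ v := by
        rcases List.mem_cons.mp hyx with h | h
        · omega
        · have := hp'.1 y h; omega
      rw [List.count_append, List.count_replicate]
      have hvy : v ≠ y := fun h => hyv h.symm
      simp [hvy, List.replicate_one]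

-- B's result is the pvStep-fold over the distinct values of (sorted A)
theorem solution_alt_eq_fold (A : List Int) :
    solution_alt A = (PySem.Set.ofList (PySem.List.sorted A (fun x => x) false)).foldl
      (pvStep (PySem.List.sorted A (fun x => x) false)) 0 := by
  unfold solution_alt
  cases hs : PySem.List.sorted A (fun x => x) false with
  | nil => simp [pvFlush, PySem.Set.ofList]
  | cons x t =>
    have hp : (x :: t).Pairwise (fun a b : Int => a ≤ b) := by
      have := PySem.List.sorted_pairwise A (fun x : Int => x)
      rwa [hs] at this
    have hp' := List.pairwise_cons.mp hp
    have hstep : pvStepB (0, none, 0) x = (0, some x, 1) := by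
      simp [pvStepB, pvFlush]
    have h1 : ((1 : Int)) = ((1 : Nat) : Int) := by norm_num
    simp only [List.foldl_cons, hstep]
    rw [h1, sweep_from t hp'.2 0 x 1 (by omega) hp'.1]
    simp [List.replicate_succ]

theorem solution_alt_eq_fold' (A : List Int) :
    solution_alt A = (PySem.Set.ofList A).foldl (pvStep A) 0 := by
  rw [solution_alt_eq_fold]
  have hperm := PySem.List.sorted_perm A (fun x : Int => x) false
  have hstep : pvStep (PySem.List.sorted A (fun x => x) false) = pvStep A := by
    funext ans x
    exact pvStep_congr ans x (hperm.count_eq x)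
  rw [hstep]
  have hsetperm : (PySem.Set.ofList (PySem.List.sorted A (fun x => x) false)).Perm
      (PySem.Set.ofList A) := by
    rw [List.perm_ext_iff_of_nodup (PySem.Set.nodup_ofList _) (PySem.Set.nodup_ofList _)]
    intro a
    rw [PySem.Set.mem_ofList, PySem.Set.mem_ofList]
    exact hperm.mem_iff
  exact @List.Perm.foldl_eq _ _ (pvStep A) _ _ (pvStep_rightComm A) hsetperm 0

-- ===== VERDICT (by name: the statement is the Claim_ definition above) =====
theorem solution_spec : Claim_equal_solution := by
  intro A _
  unfold Spec_solution
  rw [solution_eq_fold, solution_alt_eq_fold']
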